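-- pv_equiv track=rewrite | github.com/quoth-le-corbeau/advent_of_code | advent_2024/day_15/p2.py | _get_adjacent_boxes
-- ===== SOURCE A (Python) =====
-- from collections import deque
--
-- _DIRECTION_VECTORS = {"^": (-1, 0), "v": (1, 0), ">": (0, 1), "<": (0, -1)}
--
-- def _get_adjacent_boxes(
--     grid: list[list[str]], start: tuple[int, int]
-- ) -> list[tuple[tuple[int, int], tuple[int, int]]]:
--     queue = deque([start])
--     visited = {start}
--     box_coordinates = [start]
--     types = ["[", "]"]
--
--     while queue:
--         current = queue.popleft()
--         for direction in _DIRECTION_VECTORS.values():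
--             next_node = current[0] + direction[0], current[1] + direction[1]
--             if next_node not in visited and grid[next_node[0]][next_node[1]] in types:
--                 queue.append(next_node)
--                 visited.add(next_node)
--                 box_coordinates.append(next_node)
--     boxes = []
--     coordinates = sorted(box_coordinates)
--     for i in range(0, len(coordinates) - 1, 2):
--         boxes.append((coordinates[i], coordinates[i + 1]))
--     return sorted(boxes, key=lambda x: (x[1], x[0]))
-- ===== SOURCE B (Python) =====
-- _DIRECTION_VECTORS = {"^": (-1, 0), "v": (1, 0), ">": (0, 1), "<": (0, -1)}
--
--
-- def _get_adjacent_boxes(grid, start):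
--     visited = set()
--     box_coordinates = []
--
--     def fill(cell):
--         visited.add(cell)
--         box_coordinates.append(cell)
--         for dr, dc in _DIRECTION_VECTORS.values():
--             nxt = (cell[0] + dr, cell[1] + dc)
--             if nxt not in visited and grid[nxt[0]][nxt[1]] in ("[", "]"):
--                 fill(nxt)
--
--     fill(start)
--     coordinates = sorted(box_coordinates)
--     it = iter(coordinates)
--     boxes = list(zip(it, it))
--     return sorted(boxes, key=lambda x: (x[1], x[0]))
-- ===== Notes on version B (the rewrite author's own statement) =====
-- stated objective: alternative
-- what changed: B replaces A's iterative deque-based BFS with a recursive flood fill and replaces A's index-striding pairing loop (range(0, len-1, 2) with list indexing) with consecutive pairing via zip(it, it); the visited set collected is the same, so the sort/pair/sort tail yields identical output.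
import Mathlib
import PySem

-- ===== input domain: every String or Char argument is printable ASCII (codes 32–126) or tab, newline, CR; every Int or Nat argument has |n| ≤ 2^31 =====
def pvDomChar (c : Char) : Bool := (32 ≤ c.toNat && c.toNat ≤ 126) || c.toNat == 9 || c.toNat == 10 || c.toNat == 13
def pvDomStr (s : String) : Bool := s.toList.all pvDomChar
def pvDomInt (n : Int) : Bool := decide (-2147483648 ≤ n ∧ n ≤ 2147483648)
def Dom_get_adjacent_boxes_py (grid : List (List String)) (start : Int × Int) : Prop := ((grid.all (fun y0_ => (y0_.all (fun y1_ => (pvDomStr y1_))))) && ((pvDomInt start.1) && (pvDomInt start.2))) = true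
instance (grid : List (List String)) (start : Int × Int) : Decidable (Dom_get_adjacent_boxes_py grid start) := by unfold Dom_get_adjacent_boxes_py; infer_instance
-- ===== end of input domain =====

-- B replaces A's deque-based BFS with a recursive flood fill and the index-striding pairing
-- loop with consecutive pairing by structural recursion (objective: alternative, same cost).

-- ===== PORT A =====
-- _DIRECTION_VECTORS.values() in insertion order
def pvDirs : List (Int × Int) := [(-1, 0), (1, 0), (0, 1), (0, -1)]

-- grid[n0][n1] in ["[", "]"]  (a 'none' lookup is an IndexError in Python: outside Pre_)
def pvBoxAt (grid : List (List String)) (n : Int × Int) : Bool :=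
  match PySem.List.pyGet? grid n.1 with
  | some row =>
    match PySem.List.pyGet? row n.2 with
    | some s => s == "[" || s == "]"
    | none => false
  | none => false

def pvMaxLen (grid : List (List String)) : Nat := (grid.map List.length).foldl max 0

-- totality fuel for the search loops; proved sufficient on every input (pvBfsA_main below)
def pvFuel (grid : List (List String)) : Nat := 8 * grid.length * pvMaxLen grid + 8

-- while queue: pop left, scan the four directions, enqueue fresh box cells
def pvBfsA (grid : List (List String)) :
    Nat → List (Int × Int) → PySem.Set (Int × Int) → List (Int × Int) → List (Int × Int)
  | 0, _, _, boxes => boxes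
  | _ + 1, [], _, boxes => boxes
  | fuel + 1, cur :: rest, visited, boxes =>
    let st := pvDirs.foldl
      (fun st d =>
        let nxt := (cur.1 + d.1, cur.2 + d.2)
        if nxt ∉ st.2.1 ∧ pvBoxAt grid nxt = true then
          (st.1 ++ [nxt], PySem.Set.add st.2.1 nxt, st.2.2 ++ [nxt])
        else st)
      (rest, visited, boxes)
    pvBfsA grid fuel st.1 st.2.1 st.2.2

-- the comparator of sorted(…, key=lambda x: (x[1], x[0])): Python's lexicographic tuple '<',
-- in the same strict-less shape PySem.List.sorted2 uses (exact on Int pairs)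
def pvLtPair (a b : Int × Int) : Bool :=
  decide (a.1 < b.1) || (!decide (b.1 < a.1) && decide (a.2 < b.2))

def pvLtKey (x y : (Int × Int) × (Int × Int)) : Bool :=
  pvLtPair x.2 y.2 || (!pvLtPair y.2 x.2 && pvLtPair x.1 y.1)

-- sorted(boxes, key=lambda x: (x[1], x[0])): stable insertion sort, as PySem.List.sorted does
def pvSortByKey (bs : List ((Int × Int) × (Int × Int))) : List ((Int × Int) × (Int × Int)) :=
  bs.foldl (fun acc x => PySem.List.insertBy pvLtKey x acc) []

def get_adjacent_boxes_py (grid : List (List String)) (start : Int × Int) :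
    List ((Int × Int) × (Int × Int)) :=
  let box_coordinates := pvBfsA grid (pvFuel grid) [start] (PySem.Set.ofList [start]) [start]
  let coordinates := PySem.List.sorted2 box_coordinates (fun p => p.1) (fun p => p.2)
  let boxes := (PySem.List.pyRange 0 ((coordinates.length : Int) - 1) 2).foldl
    (fun acc i =>
      acc ++ [(PySem.List.pyGetD coordinates i (0, 0), PySem.List.pyGetD coordinates (i + 1) (0, 0))])
    []
  pvSortByKey boxes

-- ===== PORT B =====
-- recursive flood fill: record the cell, then recurse into fresh box neighbours
def pvFillB (grid : List (List String)) :
    Nat → Int × Int → PySem.Set (Int × Int) × List (Int × Int) →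
    PySem.Set (Int × Int) × List (Int × Int)
  | 0, _, st => st
  | fuel + 1, cell, st =>
    pvDirs.foldl
      (fun acc d =>
        let nxt := (cell.1 + d.1, cell.2 + d.2)
        if nxt ∉ acc.1 ∧ pvBoxAt grid nxt = true then pvFillB grid fuel nxt acc else acc)
      (PySem.Set.add st.1 cell, st.2 ++ [cell])

-- list(zip(it, it)) on iter(coordinates): consecutive pairs, odd tail dropped
def pvPairUp : List (Int × Int) → List ((Int × Int) × (Int × Int))
  | a :: b :: t => (a, b) :: pvPairUp t
  | _ => []

def get_adjacent_boxes_py_alt (grid : List (List String)) (start : Int × Int) :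
    List ((Int × Int) × (Int × Int)) :=
  let st := pvFillB grid (pvFuel grid) start (PySem.Set.empty, [])
  pvSortByKey (pvPairUp (PySem.List.sorted2 st.2 (fun p => p.1) (fun p => p.2)))

-- ===== PRECONDITION & SPEC =====
-- Pre_-side helpers (independent of the ports)
def pvNbr4 (p : Int × Int) : List (Int × Int) :=
  [(p.1 - 1, p.2), (p.1 + 1, p.2), (p.1, p.2 + 1), (p.1, p.2 - 1)]

def pvCell? (grid : List (List String)) (p : Int × Int) : Option String :=
  (PySem.List.pyGet? grid p.1).bind fun row => PySem.List.pyGet? row p.2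

-- all four neighbour lookups of p are in range (no IndexError when p is examined)
def pvSafe (grid : List (List String)) (p : Int × Int) : Bool :=
  (pvNbr4 p).all fun n => (pvCell? grid n).isSome

def pvIsBox (grid : List (List String)) (p : Int × Int) : Bool :=
  match pvCell? grid p with
  | some s => s == "[" || s == "]"
  | none => false

-- one saturation step of the connected box component: add every box neighbour
def pvGrow (grid : List (List String)) (S : List (Int × Int)) : List (Int × Int) :=
  (S.flatMap pvNbr4).foldl
    (fun T n => if n ∉ T ∧ pvIsBox grid n = true then T ++ [n] else T) S

-- the connected box component of start (least fixpoint; the bound saturates it)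
def pvComponent (grid : List (List String)) (start : Int × Int) : List (Int × Int) :=
  (pvGrow grid)^[grid.length * pvMaxLen grid + 1] [start]

-- Pre_ excludes exactly the inputs on which the Python A raises IndexError: some cell of the
-- connected box component of start (the cells whose neighbours the search examines) has a
-- neighbour index out of range.
def Pre_get_adjacent_boxes_py (grid : List (List String)) (start : Int × Int) : Prop :=
  ((pvComponent grid start).all fun p => pvSafe grid p) = true

instance (grid : List (List String)) (start : Int × Int) :
    Decidable (Pre_get_adjacent_boxes_py grid start) := by
  unfold Pre_get_adjacent_boxes_py; infer_instance

def pvWitness_get_adjacent_boxes_py : List (List String) × (Int × Int) :=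
  ([[".", ".", ".", "."], [".", "[", "]", "."], [".", ".", ".", "."]], (1, 1))

def Spec_get_adjacent_boxes_py (grid : List (List String)) (start : Int × Int)
    (out : List ((Int × Int) × (Int × Int))) : Prop :=
  out = get_adjacent_boxes_py_alt grid start

instance (grid : List (List String)) (start : Int × Int)
    (out : List ((Int × Int) × (Int × Int))) :
    Decidable (Spec_get_adjacent_boxes_py grid start out) := by
  unfold Spec_get_adjacent_boxes_py; infer_instance

-- ===== CLAIM (what is proved, stated in full; the proofs are below) =====
def Claim_equal_get_adjacent_boxes_py : Prop :=
  ∀ (grid : List (List String)) (start : Int × Int),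
    Dom_get_adjacent_boxes_py grid start → Pre_get_adjacent_boxes_py grid start →
      Spec_get_adjacent_boxes_py grid start (get_adjacent_boxes_py grid start)

-- ===== LEMMAS AND PROOFS =====
-- (the equivalence of the two ports in fact holds on every input; Pre_ is what the Python A
-- needs in order to return rather than raise)

-- the one-step relation of the flood: b is one of a's four neighbours and holds a box character
def pvStep (grid : List (List String)) (a b : Int × Int) : Prop :=
  (∃ d ∈ pvDirs, b = (a.1 + d.1, a.2 + d.2)) ∧ pvBoxAt grid b = true

def pvReach (grid : List (List String)) (start p : Int × Int) : Prop :=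
  Relation.ReflTransGen (pvStep grid) start p

-- a finite superset of every cell either search can ever record
def pvCand (grid : List (List String)) (start : Int × Int) : List (Int × Int) :=
  start ::
    (PySem.List.pyRange (-(grid.length : Int)) (grid.length : Int) 1).flatMap fun r =>
      (PySem.List.pyRange (-(pvMaxLen grid : Int)) (pvMaxLen grid : Int) 1).map fun c => (r, c)

lemma pvCand_length (grid : List (List String)) (start : Int × Int) :
    (pvCand grid start).length = 1 + 2 * grid.length * (2 * pvMaxLen grid) := by
  simp [pvCand, List.length_flatMap, PySem.List.length_pyRange_one]
  have e1 : (((grid.length : Int)) + grid.length).toNat = 2 * grid.length := by omega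
  have e2 : (((pvMaxLen grid : Int)) + pvMaxLen grid).toNat = 2 * pvMaxLen grid := by omega
  rw [e1, e2]; ring

lemma pvBox_mem_cand (grid : List (List String)) (start p : Int × Int)
    (h : pvBoxAt grid p = true) : p ∈ pvCand grid start := by
  unfold pvBoxAt at h
  rcases hr : PySem.List.pyGet? grid p.1 with _ | row
  · rw [hr] at h; simp at h
  have h2' : (match PySem.List.pyGet? row p.2 with | some s => s == "[" || s == "]" | none => false) = true := by rw [hr] at h; exact h
  rcases hc : PySem.List.pyGet? row p.2 with _ | s
  · rw [hc] at h2'; simp at h2'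
  have h1 : PySem.Raise.InRange grid.length p.1 := by
    by_contra hn
    rw [(PySem.List.pyGet?_eq_none_iff grid p.1).2 hn] at hr; simp at hr
  have h2 : PySem.Raise.InRange row.length p.2 := by
    by_contra hn
    rw [(PySem.List.pyGet?_eq_none_iff row p.2).2 hn] at hc; simp at hc
  have hrow : row ∈ grid := PySem.List.mem_of_pyGet?_eq_some grid hr
  have hle : row.length ≤ pvMaxLen grid := by
    have := (PySem.List.le_foldl_max (grid.map List.length) 0).2
    exact this row.length (List.mem_map_of_mem hrow)
  unfold PySem.Raise.InRange at h1 h2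
  refine List.mem_cons.2 (Or.inr ?_)
  refine List.mem_flatMap.2 ⟨p.1, ?_, ?_⟩
  · exact (PySem.List.mem_pyRange_one).2 (by omega)
  · refine List.mem_map.2 ⟨p.2, ?_, rfl⟩
    exact (PySem.List.mem_pyRange_one).2 (by omega)

lemma pvNodup_subset_length {l m : List (Int × Int)} (h1 : l.Nodup) (h2 : l ⊆ m) :
    l.length ≤ m.length := by
  calc l.length = l.toFinset.card := (List.toFinset_card_of_nodup h1).symm
    _ ≤ m.toFinset.card := Finset.card_le_card (fun x hx => List.mem_toFinset.2 (h2 (List.mem_toFinset.1 hx)))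
    _ ≤ m.length := List.toFinset_card_le m

lemma pvReach_mem (grid : List (List String)) (start : Int × Int) (out : List (Int × Int))
    (hst : start ∈ out)
    (hcl : ∀ p ∈ out, ∀ d ∈ pvDirs, pvBoxAt grid (p.1 + d.1, p.2 + d.2) = true →
      (p.1 + d.1, p.2 + d.2) ∈ out) :
    ∀ p, pvReach grid start p → p ∈ out := by
  intro p h
  induction h with
  | refl => exact hst
  | tail h' st ih =>
    rcases st with ⟨⟨d, hd, rfl⟩, hbox⟩
    exact hcl _ ih d hd hbox

lemma pvStepFoldA (grid : List (List String)) (cur : Int × Int) :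
    ∀ (ds : List (Int × Int)) (q vis : List (Int × Int)),
    ∃ new : List (Int × Int),
      ds.foldl
        (fun st d =>
          let nxt := (cur.1 + d.1, cur.2 + d.2)
          if nxt ∉ st.2.1 ∧ pvBoxAt grid nxt = true then
            (st.1 ++ [nxt], PySem.Set.add st.2.1 nxt, st.2.2 ++ [nxt])
          else st)
        ((q, vis, vis) : List (Int × Int) × PySem.Set (Int × Int) × List (Int × Int)) =
        (q ++ new, vis ++ new, vis ++ new) ∧
      new.Nodup ∧
      (∀ x ∈ new, x ∉ vis ∧ pvBoxAt grid x = true ∧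
        ∃ d ∈ ds, x = (cur.1 + d.1, cur.2 + d.2)) ∧
      (∀ d ∈ ds, pvBoxAt grid (cur.1 + d.1, cur.2 + d.2) = true →
        (cur.1 + d.1, cur.2 + d.2) ∈ vis ++ new) := by
  intro ds
  induction ds with
  | nil =>
    intro q vis
    exact ⟨[], by simp, by simp, by simp, by simp⟩
  | cons d ds ih =>
    intro q vis
    rw [List.foldl_cons]
    by_cases hg : (cur.1 + d.1, cur.2 + d.2) ∉ vis ∧ pvBoxAt grid (cur.1 + d.1, cur.2 + d.2) = true
    · have hstep : (let nxt := (cur.1 + d.1, cur.2 + d.2);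
          if nxt ∉ ((q, vis, vis) : List (Int × Int) × PySem.Set (Int × Int) × List (Int × Int)).2.1 ∧ pvBoxAt grid nxt = true then
            ((q, vis, vis).1 ++ [nxt], PySem.Set.add ((q, vis, vis) : List (Int × Int) × PySem.Set (Int × Int) × List (Int × Int)).2.1 nxt, (q, vis, vis).2.2 ++ [nxt])
          else (q, vis, vis)) =
          ((q ++ [(cur.1 + d.1, cur.2 + d.2)], vis ++ [(cur.1 + d.1, cur.2 + d.2)],
            vis ++ [(cur.1 + d.1, cur.2 + d.2)]) : List (Int × Int) × PySem.Set (Int × Int) × List (Int × Int)) := by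
        show (if (cur.1 + d.1, cur.2 + d.2) ∉ vis ∧ pvBoxAt grid (cur.1 + d.1, cur.2 + d.2) = true then
            (q ++ [(cur.1 + d.1, cur.2 + d.2)], PySem.Set.add vis (cur.1 + d.1, cur.2 + d.2), vis ++ [(cur.1 + d.1, cur.2 + d.2)])
          else (q, vis, vis)) = _
        rw [if_pos hg, PySem.Set.add_of_not_mem hg.1]
      rw [hstep]
      obtain ⟨new, h1, h2, h3, h4⟩ := ih (q ++ [(cur.1 + d.1, cur.2 + d.2)]) (vis ++ [(cur.1 + d.1, cur.2 + d.2)])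
      refine ⟨(cur.1 + d.1, cur.2 + d.2) :: new, ?_, ?_, ?_, ?_⟩
      · rw [h1]; simp
      · refine List.nodup_cons.2 ⟨?_, h2⟩
        intro hmem
        exact (h3 _ hmem).1 (by simp)
      · intro x hx
        rcases List.mem_cons.1 hx with rfl | hx'
        · exact ⟨hg.1, hg.2, d, by simp⟩
        · obtain ⟨hnv, hb, d', hd', he⟩ := h3 x hx'
          exact ⟨fun hc => hnv (by simp [hc]), hb, d', by simp [hd'], he⟩
      · intro d' hd' hb
        rcases List.mem_cons.1 hd' with rfl | hd''
        · simp
        · have := h4 d' hd'' hb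
          simpa [List.append_assoc] using this
    · have hstep : (let nxt := (cur.1 + d.1, cur.2 + d.2);
          if nxt ∉ ((q, vis, vis) : List (Int × Int) × PySem.Set (Int × Int) × List (Int × Int)).2.1 ∧ pvBoxAt grid nxt = true then
            ((q, vis, vis).1 ++ [nxt], PySem.Set.add ((q, vis, vis) : List (Int × Int) × PySem.Set (Int × Int) × List (Int × Int)).2.1 nxt, (q, vis, vis).2.2 ++ [nxt])
          else (q, vis, vis)) =
          ((q, vis, vis) : List (Int × Int) × PySem.Set (Int × Int) × List (Int × Int)) := by
        show (if (cur.1 + d.1, cur.2 + d.2) ∉ vis ∧ pvBoxAt grid (cur.1 + d.1, cur.2 + d.2) = true then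
            (q ++ [(cur.1 + d.1, cur.2 + d.2)], PySem.Set.add vis (cur.1 + d.1, cur.2 + d.2), vis ++ [(cur.1 + d.1, cur.2 + d.2)])
          else (q, vis, vis)) = _
        rw [if_neg hg]
      rw [hstep]
      obtain ⟨new, h1, h2, h3, h4⟩ := ih q vis
      refine ⟨new, h1, h2, ?_, ?_⟩
      · intro x hx
        obtain ⟨hnv, hb, d', hd', he⟩ := h3 x hx
        exact ⟨hnv, hb, d', by simp [hd'], he⟩
      · intro d' hd' hb
        rcases List.mem_cons.1 hd' with rfl | hd''
        · rw [Classical.not_and_iff_not_or_not] at hg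
          rcases hg with hg | hg
          · rw [not_not] at hg
            exact List.mem_append.2 (Or.inl hg)
          · exact absurd hb hg
        · exact h4 d' hd'' hb

lemma pvBfsA_main (grid : List (List String)) (start : Int × Int) :
    ∀ (fuel : Nat) (q vis : List (Int × Int)),
    vis.Nodup → (∀ x ∈ q, x ∈ vis) → start ∈ vis →
    (∀ p ∈ vis, pvReach grid start p) →
    (∀ p ∈ vis, p ∈ pvCand grid start) →
    (∀ p ∈ vis, p ∉ q → ∀ d ∈ pvDirs,
      pvBoxAt grid (p.1 + d.1, p.2 + d.2) = true → (p.1 + d.1, p.2 + d.2) ∈ vis) →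
    2 * ((pvCand grid start).length - vis.length) + q.length < fuel →
    (pvBfsA grid fuel q vis vis).Nodup ∧
      vis ⊆ pvBfsA grid fuel q vis vis ∧
      (∀ p ∈ pvBfsA grid fuel q vis vis, pvReach grid start p) ∧
      (∀ p ∈ pvBfsA grid fuel q vis vis, ∀ d ∈ pvDirs,
        pvBoxAt grid (p.1 + d.1, p.2 + d.2) = true →
          (p.1 + d.1, p.2 + d.2) ∈ pvBfsA grid fuel q vis vis) := by
  intro fuel
  induction fuel with
  | zero => intro q vis _ _ _ _ _ _ hfuel; omega
  | succ fuel ih =>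
    intro q vis hvn hsub hst hsound hcand hclosed hfuel
    match q with
    | [] =>
      refine ⟨hvn, fun x hx => hx, hsound, ?_⟩
      intro p hp d hd hb
      exact hclosed p hp (by simp) d hd hb
    | cur :: rest =>
      obtain ⟨new, h1, h2, h3, h4⟩ := pvStepFoldA grid cur pvDirs rest vis
      have hcur : cur ∈ vis := hsub cur (by simp)
      have heq : pvBfsA grid (fuel + 1) (cur :: rest) vis vis =
          pvBfsA grid fuel (rest ++ new) (vis ++ new) (vis ++ new) := by
        simp only [pvBfsA]
        rw [h1]
      rw [heq]
      -- invariants for the new state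
      have hdisj : ∀ x ∈ new, x ∉ vis := fun x hx => (h3 x hx).1
      have hvn' : (vis ++ new).Nodup := by
        rw [List.nodup_append]
        exact ⟨hvn, h2, fun a ha b hb hab => hdisj b hb (hab ▸ ha)⟩
      have hsub' : ∀ x ∈ rest ++ new, x ∈ vis ++ new := by
        intro x hx
        rcases List.mem_append.1 hx with hx | hx
        · exact List.mem_append.2 (Or.inl (hsub x (by simp [hx])))
        · exact List.mem_append.2 (Or.inr hx)
      have hst' : start ∈ vis ++ new := List.mem_append.2 (Or.inl hst)
      have hsound' : ∀ p ∈ vis ++ new, pvReach grid start p := by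
        intro p hp
        rcases List.mem_append.1 hp with hp | hp
        · exact hsound p hp
        · obtain ⟨_, hb, d, hd, rfl⟩ := h3 p hp
          exact Relation.ReflTransGen.tail (hsound cur hcur) ⟨⟨d, hd, rfl⟩, hb⟩
      have hcand' : ∀ p ∈ vis ++ new, p ∈ pvCand grid start := by
        intro p hp
        rcases List.mem_append.1 hp with hp | hp
        · exact hcand p hp
        · exact pvBox_mem_cand grid start p (h3 p hp).2.1
      have hclosed' : ∀ p ∈ vis ++ new, p ∉ rest ++ new → ∀ d ∈ pvDirs,
          pvBoxAt grid (p.1 + d.1, p.2 + d.2) = true → (p.1 + d.1, p.2 + d.2) ∈ vis ++ new := by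
        intro p hp hpq d hd hb
        by_cases hpc : p = cur
        · subst hpc; exact h4 d hd hb
        · rcases List.mem_append.1 hp with hp | hp
          · have hpnotq : p ∉ cur :: rest := by
              intro hc
              rcases List.mem_cons.1 hc with rfl | hc
              · exact hpc rfl
              · exact hpq (List.mem_append.2 (Or.inl hc))
            exact List.mem_append.2 (Or.inl (hclosed p hp hpnotq d hd hb))
          · exact absurd (List.mem_append.2 (Or.inr hp)) hpq
      have hlen : (vis ++ new).length ≤ (pvCand grid start).length :=
        pvNodup_subset_length hvn' (fun x hx => hcand' x hx)
      have hfuel' : 2 * ((pvCand grid start).length - (vis ++ new).length) +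
          (rest ++ new).length < fuel := by
        simp only [List.length_append] at *
        simp only [List.length_cons] at hfuel
        omega
      have hres := ih (rest ++ new) (vis ++ new) hvn' hsub' hst' hsound' hcand' hclosed' hfuel'
      refine ⟨hres.1, ?_, hres.2.2.1, hres.2.2.2⟩
      exact fun x hx => hres.2.1 (List.mem_append.2 (Or.inl hx))

lemma pvFillB_main (grid : List (List String)) (start : Int × Int) :
    ∀ (fuel : Nat) (cell : Int × Int) (vis : List (Int × Int)),
    vis.Nodup → cell ∉ vis →
    (∀ p ∈ vis, p ∈ pvCand grid start) → cell ∈ pvCand grid start →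
    pvReach grid start cell → (∀ p ∈ vis, pvReach grid start p) →
    (pvCand grid start).length < vis.length + fuel →
    ∃ ext : List (Int × Int),
      pvFillB grid fuel cell (vis, vis) = (vis ++ cell :: ext, vis ++ cell :: ext) ∧
      (vis ++ cell :: ext).Nodup ∧
      (∀ p ∈ cell :: ext, pvReach grid start p ∧ p ∈ pvCand grid start) ∧
      (∀ p ∈ cell :: ext, ∀ d ∈ pvDirs,
        pvBoxAt grid (p.1 + d.1, p.2 + d.2) = true →
          (p.1 + d.1, p.2 + d.2) ∈ vis ++ cell :: ext) := by
  intro fuel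
  induction fuel with
  | zero =>
    intro cell vis hvn _ hcand _ _ _ hfuel
    have := pvNodup_subset_length hvn (fun x hx => hcand x hx)
    omega
  | succ fuel ih =>
    intro cell vis hvn hcv hcand hccand hrc hrv hfuel
    have haux : ∀ (ds : List (Int × Int)) (w : List (Int × Int)),
        (∀ d ∈ ds, d ∈ pvDirs) →
        w.Nodup → (∀ p ∈ w, p ∈ pvCand grid start) → (∀ p ∈ w, pvReach grid start p) →
        (vis ++ [cell]) <+: w →
        (∀ p ∈ w, p ∉ vis → p ≠ cell → ∀ d ∈ pvDirs,
          pvBoxAt grid (p.1 + d.1, p.2 + d.2) = true → (p.1 + d.1, p.2 + d.2) ∈ w) →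
        ∃ e : List (Int × Int),
          ds.foldl
            (fun acc d =>
              let nxt := (cell.1 + d.1, cell.2 + d.2)
              if nxt ∉ acc.1 ∧ pvBoxAt grid nxt = true then pvFillB grid fuel nxt acc else acc)
            ((w, w) : PySem.Set (Int × Int) × List (Int × Int)) = (w ++ e, w ++ e) ∧
          (w ++ e).Nodup ∧
          (∀ p ∈ e, pvReach grid start p ∧ p ∈ pvCand grid start) ∧
          (∀ p ∈ w ++ e, p ∉ vis → p ≠ cell → ∀ d ∈ pvDirs,
            pvBoxAt grid (p.1 + d.1, p.2 + d.2) = true → (p.1 + d.1, p.2 + d.2) ∈ w ++ e) ∧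
          (∀ d ∈ ds, pvBoxAt grid (cell.1 + d.1, cell.2 + d.2) = true →
            (cell.1 + d.1, cell.2 + d.2) ∈ w ++ e) := by
      intro ds
      induction ds with
      | nil =>
        intro w _ hwn hwc hwr hpre hmid
        exact ⟨[], by simp, by simpa using hwn, by simp, by simpa using hmid, by simp⟩
      | cons d ds ihd =>
        intro w hds hwn hwc hwr hpre hmid
        have hdin : d ∈ pvDirs := hds d (by simp)
        have hds' : ∀ d' ∈ ds, d' ∈ pvDirs := fun d' hd' => hds d' (by simp [hd'])
        rw [List.foldl_cons]
        have hcellw : cell ∈ w := hpre.subset (by simp)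
        by_cases hg : (cell.1 + d.1, cell.2 + d.2) ∉ w ∧ pvBoxAt grid (cell.1 + d.1, cell.2 + d.2) = true
        · have hstep : (let nxt := (cell.1 + d.1, cell.2 + d.2);
              if nxt ∉ ((w, w) : PySem.Set (Int × Int) × List (Int × Int)).1 ∧ pvBoxAt grid nxt = true then
                pvFillB grid fuel nxt (w, w) else ((w, w) : PySem.Set (Int × Int) × List (Int × Int))) =
              pvFillB grid fuel (cell.1 + d.1, cell.2 + d.2) (w, w) := by
            show (if (cell.1 + d.1, cell.2 + d.2) ∉ w ∧ pvBoxAt grid (cell.1 + d.1, cell.2 + d.2) = true then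
                pvFillB grid fuel (cell.1 + d.1, cell.2 + d.2) (w, w) else (w, w)) = _
            rw [if_pos hg]
          rw [hstep]
          have hlenw : vis.length + 1 ≤ w.length := by
            have := hpre.length_le
            simpa using this
          obtain ⟨ext', he1, he2, he3, he4⟩ := ih (cell.1 + d.1, cell.2 + d.2) w hwn hg.1 hwc
            (pvBox_mem_cand grid start _ hg.2)
            (Relation.ReflTransGen.tail (hwr cell hcellw) ⟨⟨d, hdin, rfl⟩, hg.2⟩)
            hwr (by omega)
          rw [he1]
          obtain ⟨e', hf1, hf2, hf3, hf4, hf5⟩ := ihd (w ++ (cell.1 + d.1, cell.2 + d.2) :: ext')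
            hds' he2
            (by intro p hp
                rcases List.mem_append.1 hp with hp | hp
                · exact hwc p hp
                · exact (he3 p hp).2)
            (by intro p hp
                rcases List.mem_append.1 hp with hp | hp
                · exact hwr p hp
                · exact (he3 p hp).1)
            (hpre.trans (List.prefix_append w _))
            (by intro p hp hp1 hp2 d' hd' hb
                rcases List.mem_append.1 hp with hp | hp
                · exact List.mem_append.2 (Or.inl (hmid p hp hp1 hp2 d' hd' hb))
                · exact he4 p hp d' hd' hb)
          refine ⟨(cell.1 + d.1, cell.2 + d.2) :: ext' ++ e', ?_, ?_, ?_, ?_, ?_⟩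
          · rw [hf1]; simp
          · rw [show w ++ ((cell.1 + d.1, cell.2 + d.2) :: ext' ++ e') =
              (w ++ (cell.1 + d.1, cell.2 + d.2) :: ext') ++ e' by simp]
            exact hf2
          · intro p hp
            rcases List.mem_cons.1 hp with rfl | hp'
            · exact ⟨Relation.ReflTransGen.tail (hwr cell hcellw)
                ⟨⟨d, hdin, rfl⟩, hg.2⟩, pvBox_mem_cand grid start _ hg.2⟩
            · rcases List.mem_append.1 hp' with hp'' | hp''
              · exact he3 p (by simp [hp''])
              · exact hf3 p hp''
          · intro p hp hp1 hp2 d' hd' hb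
            have : p ∈ (w ++ (cell.1 + d.1, cell.2 + d.2) :: ext') ++ e' := by simpa using hp
            have := hf4 p this hp1 hp2 d' hd' hb
            simpa using this
          · intro d' hd' hb
            rcases List.mem_cons.1 hd' with rfl | hd''
            · simp
            · have := hf5 d' hd'' hb
              simpa using this
        · have hstep : (let nxt := (cell.1 + d.1, cell.2 + d.2);
              if nxt ∉ ((w, w) : PySem.Set (Int × Int) × List (Int × Int)).1 ∧ pvBoxAt grid nxt = true then
                pvFillB grid fuel nxt (w, w) else ((w, w) : PySem.Set (Int × Int) × List (Int × Int))) =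
              ((w, w) : PySem.Set (Int × Int) × List (Int × Int)) := by
            show (if (cell.1 + d.1, cell.2 + d.2) ∉ w ∧ pvBoxAt grid (cell.1 + d.1, cell.2 + d.2) = true then
                pvFillB grid fuel (cell.1 + d.1, cell.2 + d.2) (w, w) else (w, w)) = _
            rw [if_neg hg]
          rw [hstep]
          obtain ⟨e, hf1, hf2, hf3, hf4, hf5⟩ := ihd w hds' hwn hwc hwr hpre hmid
          refine ⟨e, hf1, hf2, hf3, hf4, ?_⟩
          intro d' hd' hb
          rcases List.mem_cons.1 hd' with rfl | hd''
          · rw [Classical.not_and_iff_not_or_not] at hg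
            rcases hg with hg | hg
            · rw [not_not] at hg
              exact List.mem_append.2 (Or.inl hg)
            · exact absurd hb hg
          · exact hf5 d' hd'' hb
    -- apply aux to the full direction list starting from vis ++ [cell]
    have hw0n : (vis ++ [cell]).Nodup := by
      rw [List.nodup_append]
      exact ⟨hvn, by simp, by intro a ha b hb hab; simp at hb; subst hb; exact hcv (hab ▸ ha)⟩
    obtain ⟨e, h1, h2, h3, h4, h5⟩ := haux pvDirs (vis ++ [cell]) (fun d hd => hd) hw0n
      (by intro p hp
          rcases List.mem_append.1 hp with hp | hp
          · exact hcand p hp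
          · simp at hp; subst hp; exact hccand)
      (by intro p hp
          rcases List.mem_append.1 hp with hp | hp
          · exact hrv p hp
          · simp at hp; subst hp; exact hrc)
      (List.prefix_refl _)
      (by intro p hp hp1 hp2
          rcases List.mem_append.1 hp with hp | hp
          · exact absurd hp hp1
          · simp at hp; exact absurd hp hp2)
    have heq : pvFillB grid (fuel + 1) cell (vis, vis) =
        (((vis ++ [cell]) ++ e, (vis ++ [cell]) ++ e) : PySem.Set (Int × Int) × List (Int × Int)) := by
      simp only [pvFillB]
      rw [show PySem.Set.add ((vis, vis) : PySem.Set (Int × Int) × List (Int × Int)).1 cell =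
        vis ++ [cell] from PySem.Set.add_of_not_mem hcv]
      exact h1
    refine ⟨e, ?_, ?_, ?_, ?_⟩
    · rw [heq]; simp
    · simpa using h2
    · intro p hp
      rcases List.mem_cons.1 hp with rfl | hp'
      · exact ⟨hrc, hccand⟩
      · exact h3 p hp'
    · intro p hp d hd hb
      have hp' : p ∈ (vis ++ [cell]) ++ e := by
        rcases List.mem_cons.1 hp with rfl | hp'
        · simp
        · simp [hp']
      by_cases hpc : p = cell
      · subst hpc
        have := h5 d hd hb
        simpa using this
      · have hp1 : p ∉ vis := by
          rcases List.mem_cons.1 hp with rfl | hp'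
          · exact hcv
          · intro hc
            have hnd := h2
            rw [List.nodup_append] at hnd
            exact hnd.2.2 p (by simp [hc]) p hp' rfl
        have := h4 p hp' hp1 hpc d hd hb
        simpa using this

lemma pvVisitedA_spec (grid : List (List String)) (start : Int × Int) :
    (pvBfsA grid (pvFuel grid) [start] (PySem.Set.ofList [start]) [start]).Nodup ∧
      (∀ p, p ∈ pvBfsA grid (pvFuel grid) [start] (PySem.Set.ofList [start]) [start] ↔
        pvReach grid start p) := by
  have hof : (PySem.Set.ofList [start] : List (Int × Int)) = [start] := by
    simp [PySem.Set.ofList_eq_self_of_nodup]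
  rw [hof]
  have h := pvBfsA_main grid start (pvFuel grid) [start] [start]
    (by simp) (by simp) (by simp)
    (by intro p hp; simp at hp; subst hp; exact Relation.ReflTransGen.refl)
    (by intro p hp; simp at hp; subst hp; exact List.mem_cons_self)
    (by intro p hp hnp; simp at hp; simp [hp] at hnp)
    (by rw [pvCand_length]
        unfold pvFuel
        rw [show 2 * grid.length * (2 * pvMaxLen grid) = 4 * (grid.length * pvMaxLen grid) from by ring,
          Nat.mul_assoc]
        simp only [List.length_cons, List.length_nil]
        omega)
  refine ⟨h.1, fun p => ⟨h.2.2.1 p, ?_⟩⟩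
  exact fun hr => pvReach_mem grid start _ (h.2.1 (by simp)) h.2.2.2 p hr

lemma pvVisitedB_spec (grid : List (List String)) (start : Int × Int) :
    ((pvFillB grid (pvFuel grid) start (PySem.Set.empty, [])).2).Nodup ∧
      (∀ p, p ∈ (pvFillB grid (pvFuel grid) start (PySem.Set.empty, [])).2 ↔
        pvReach grid start p) := by
  obtain ⟨ext, h1, h2, h3, h4⟩ := pvFillB_main grid start (pvFuel grid) start []
    (by simp) (by simp) (by simp) List.mem_cons_self Relation.ReflTransGen.refl (by simp)
    (by rw [pvCand_length]
        unfold pvFuel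
        rw [show 2 * grid.length * (2 * pvMaxLen grid) = 4 * (grid.length * pvMaxLen grid) from by ring,
          Nat.mul_assoc]
        simp only [List.length_nil]
        omega)
  have hB : (pvFillB grid (pvFuel grid) start ((PySem.Set.empty : PySem.Set (Int × Int)), ([] : List (Int × Int)))).2 = start :: ext := by
    have : ((PySem.Set.empty : PySem.Set (Int × Int)), ([] : List (Int × Int))) =
        (([] : List (Int × Int)), ([] : List (Int × Int))) := rfl
    rw [this, h1]; simp
  rw [hB]
  simp only [List.nil_append] at h1 h2 h3 h4
  refine ⟨h2, fun p => ⟨fun hp => (h3 p hp).1, ?_⟩⟩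
  exact fun hr => pvReach_mem grid start _ List.mem_cons_self h4 p hr

lemma pvVisited_perm (grid : List (List String)) (start : Int × Int) :
    (pvBfsA grid (pvFuel grid) [start] (PySem.Set.ofList [start]) [start]).Perm
      (pvFillB grid (pvFuel grid) start (PySem.Set.empty, [])).2 := by
  obtain ⟨ha1, ha2⟩ := pvVisitedA_spec grid start
  obtain ⟨hb1, hb2⟩ := pvVisitedB_spec grid start
  exact (List.perm_ext_iff_of_nodup ha1 hb1).2 (fun p => (ha2 p).trans (hb2 p).symm)

lemma pvLtPair_mix : ∀ x y z, pvLtPair x y = true → pvLtPair z y = false → pvLtPair z x = false := by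
  intro x y z h1 h2
  simp [pvLtPair] at *
  omega

lemma pvLtPair_asym : ∀ a b, pvLtPair a b = true → pvLtPair b a = false := by
  intro a b h; simp [pvLtPair] at *; omega

lemma pvLtPair_anti : ∀ a b, pvLtPair a b = false → pvLtPair b a = false → a = b := by
  intro a b h1 h2
  simp [pvLtPair] at *
  have : a.1 = b.1 := by omega
  have : a.2 = b.2 := by omega
  exact Prod.ext (by omega) (by omega)

lemma pvInsertBy_pairwise (before : Int × Int → Int × Int → Bool)
    (hmix : ∀ x y z, before x y = true → before z y = false → before z x = false)
    (hasym : ∀ a b, before a b = true → before b a = false)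
    (x : Int × Int) (l : List (Int × Int))
    (hl : l.Pairwise fun a b => before b a = false) :
    (PySem.List.insertBy before x l).Pairwise fun a b => before b a = false := by
  induction l with
  | nil => simp [PySem.List.insertBy]
  | cons y ys ih =>
    rw [List.pairwise_cons] at hl
    by_cases hb : before x y = true
    · show (if before x y = true then x :: y :: ys else y :: PySem.List.insertBy before x ys).Pairwise _
      rw [if_pos hb]
      refine List.pairwise_cons.2 ⟨?_, List.pairwise_cons.2 hl⟩
      intro z hz
      rcases List.mem_cons.1 hz with rfl | hz'
      · exact hasym _ _ hb
      · exact hmix x y z hb (hl.1 z hz')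
    · show (if before x y = true then x :: y :: ys else y :: PySem.List.insertBy before x ys).Pairwise _
      rw [if_neg hb]
      refine List.pairwise_cons.2 ⟨?_, ih hl.2⟩
      intro z hz
      have hmem := PySem.List.mem_insertBy (before := before) (x := x) (ys := ys) (y := z)
      rcases hmem.1 hz with rfl | hz'
      · exact eq_false_of_ne_true hb
      · exact hl.1 z hz'

lemma pvIsort_pairwise (before : Int × Int → Int × Int → Bool)
    (hmix : ∀ x y z, before x y = true → before z y = false → before z x = false)
    (hasym : ∀ a b, before a b = true → before b a = false)
    (xs : List (Int × Int)) :
    (xs.foldl (fun acc x => PySem.List.insertBy before x acc) []).Pairwise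
      fun a b => before b a = false := by
  suffices h : ∀ acc : List (Int × Int), (acc.Pairwise fun a b => before b a = false) →
      ((xs.foldl (fun acc x => PySem.List.insertBy before x acc) acc).Pairwise
        fun a b => before b a = false) from h [] (by simp)
  induction xs with
  | nil => intro acc h; simpa using h
  | cons x t ih =>
    intro acc h
    exact ih _ (pvInsertBy_pairwise before hmix hasym x acc h)

lemma pvSorted_unique (before : Int × Int → Int × Int → Bool)
    (hanti : ∀ a b, before a b = false → before b a = false → a = b) :
    ∀ l₁ l₂ : List (Int × Int),
      l₁.Pairwise (fun a b => before b a = false) →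
      l₂.Pairwise (fun a b => before b a = false) → l₁.Perm l₂ → l₁ = l₂ := by
  intro l₁
  induction l₁ with
  | nil => intro l₂ _ _ hp; simpa using hp.symm.eq_nil
  | cons a t ih =>
    intro l₂ h1 h2 hp
    cases l₂ with
    | nil => simpa using hp.eq_nil
    | cons b t₂ =>
      rw [List.pairwise_cons] at h1 h2
      have hab : a = b := by
        by_cases hq : a = b
        · exact hq
        · have haz : a ∈ b :: t₂ := hp.mem_iff.1 (by simp)
          have hbz : b ∈ a :: t := hp.mem_iff.2 (by simp)
          have h1' : before b a = false := by
            rcases List.mem_cons.1 hbz with h | h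
            · exact absurd h.symm hq
            · exact h1.1 b h
          have h2' : before a b = false := by
            rcases List.mem_cons.1 haz with h | h
            · exact absurd h hq
            · exact h2.1 a h
          exact hanti a b h2' h1'
      subst hab
      have := ih t₂ h1.2 h2.2 (hp.cons_inv)
      rw [this]

lemma pvSorted2_eq_isort (xs : List (Int × Int)) :
    PySem.List.sorted2 xs (fun p => p.1) (fun p => p.2) =
      xs.foldl (fun acc x => PySem.List.insertBy pvLtPair x acc) [] := rfl

lemma pvSorted2_eq_of_perm (xs ys : List (Int × Int)) (h : xs.Perm ys) :
    PySem.List.sorted2 xs (fun p => p.1) (fun p => p.2) =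
      PySem.List.sorted2 ys (fun p => p.1) (fun p => p.2) := by
  have hp : (PySem.List.sorted2 xs (fun p => p.1) (fun p => p.2)).Perm
      (PySem.List.sorted2 ys (fun p => p.1) (fun p => p.2)) :=
    ((PySem.List.sorted2_perm xs _ _ false).trans h).trans
      (PySem.List.sorted2_perm ys _ _ false).symm
  rw [pvSorted2_eq_isort, pvSorted2_eq_isort] at *
  exact pvSorted_unique pvLtPair pvLtPair_anti _ _
    (pvIsort_pairwise pvLtPair pvLtPair_mix pvLtPair_asym xs)
    (pvIsort_pairwise pvLtPair pvLtPair_mix pvLtPair_asym ys) hp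

lemma pvRange_pair (d : Int × Int) :
    ∀ l : List (Int × Int), (List.range (l.length / 2)).map
      (fun k => (l.getD (2 * k) d, l.getD (2 * k + 1) d)) = pvPairUp l := by
  intro l
  induction l using pvPairUp.induct with
  | case1 a b t ih =>
    have hlen : (a :: b :: t).length / 2 = t.length / 2 + 1 := by simp; omega
    rw [hlen, List.range_succ_eq_map, List.map_cons, List.map_map]
    rw [pvPairUp]
    refine List.cons_eq_cons.mpr ⟨by simp, ?_⟩
    rw [← ih]
    apply List.map_congr_left
    intro k _
    have e1 : 2 * (k + 1) = (2 * k + 1) + 1 := by omega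
    have e2 : 2 * (k + 1) + 1 = ((2 * k + 1) + 1) + 1 := by omega
    simp [Function.comp, e1]
  | case2 l h =>
    have : l.length / 2 = 0 := by
      rcases l with _ | ⟨a, _ | ⟨b, t⟩⟩
      · simp
      · simp
      · exact absurd rfl (h a b t)
    rw [this]
    rcases l with _ | ⟨a, _ | ⟨b, t⟩⟩ <;> simp [pvPairUp]
    exact absurd rfl (h a b t)

lemma pvPair_eq (l : List (Int × Int)) :
    (PySem.List.pyRange 0 ((l.length : Int) - 1) 2).map
      (fun i => (PySem.List.pyGetD l i ((0 : Int), (0 : Int)),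
        PySem.List.pyGetD l (i + 1) ((0 : Int), (0 : Int)))) = pvPairUp l := by
  rw [PySem.List.pyRange_of_pos _ _ (by norm_num), List.map_map]
  rw [← pvRange_pair ((0 : Int), (0 : Int)) l]
  have hcount : (if (0 : Int) < (l.length : Int) - 1 then (((l.length : Int) - 1 - 0 + 2 - 1) / 2).toNat else 0) = l.length / 2 := by
    split_ifs with h <;> omega
  rw [hcount]
  apply List.map_congr_left
  intro k _
  have e0 : (0 : Int) + 2 * (k : Int) = ((2 * k : Nat) : Int) := by push_cast; ring
  have e1 : ((2 * k : Nat) : Int) + 1 = ((2 * k + 1 : Nat) : Int) := by push_cast; ring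
  simp only [Function.comp, e0, e1, PySem.List.pyGetD_natCast]

-- ===== VERDICT (by name: the statement is the Claim_ definition above) =====
theorem get_adjacent_boxes_py_spec : Claim_equal_get_adjacent_boxes_py := by
  intro grid start _ _
  unfold Spec_get_adjacent_boxes_py get_adjacent_boxes_py get_adjacent_boxes_py_alt
  show pvSortByKey ((PySem.List.pyRange 0
      (((PySem.List.sorted2 (pvBfsA grid (pvFuel grid) [start] (PySem.Set.ofList [start]) [start])
        (fun p => p.1) (fun p => p.2)).length : Int) - 1) 2).foldl
      (fun acc i =>
        acc ++ [(PySem.List.pyGetD (PySem.List.sorted2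
            (pvBfsA grid (pvFuel grid) [start] (PySem.Set.ofList [start]) [start])
            (fun p => p.1) (fun p => p.2)) i (0, 0),
          PySem.List.pyGetD (PySem.List.sorted2
            (pvBfsA grid (pvFuel grid) [start] (PySem.Set.ofList [start]) [start])
            (fun p => p.1) (fun p => p.2)) (i + 1) (0, 0))])
      []) =
    pvSortByKey (pvPairUp (PySem.List.sorted2
      (pvFillB grid (pvFuel grid) start (PySem.Set.empty, [])).2 (fun p => p.1) (fun p => p.2)))
  rw [PySem.List.foldl_append_singleton_eq_map
    (fun i => (PySem.List.pyGetD (PySem.List.sorted2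
        (pvBfsA grid (pvFuel grid) [start] (PySem.Set.ofList [start]) [start])
        (fun p => p.1) (fun p => p.2)) i (0, 0),
      PySem.List.pyGetD (PySem.List.sorted2
        (pvBfsA grid (pvFuel grid) [start] (PySem.Set.ofList [start]) [start])
        (fun p => p.1) (fun p => p.2)) (i + 1) (0, 0)))]
  rw [List.nil_append, pvPair_eq]
  rw [pvSorted2_eq_of_perm _ _ (pvVisited_perm grid start)]
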